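-- pv_equiv track=rewrite | github.com/gusn0905/Problems | SWEA/D3/1220.[SW 문제해결 기본]Magnetic.py | magnetic
-- ===== SOURCE A (Python) =====
-- def magnetic(lst, n):
--     cnt = 0
--     new_lst = []
--     for row in range(n):
--         temp = []
--         for column in range(n):
--             if lst[row][column] != 0:
--                 temp.append(lst[row][column])
--         new_lst.append(temp)
--     for row in range(n):
--         for column in range(len(new_lst[row]) - 1):
--             if new_lst[row][column] == 1 and new_lst[row][column + 1] == 2:
--                 cnt += 1
--     return cnt
-- ===== SOURCE B (Python) =====
-- def magnetic(lst, n):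
--     if n <= 0:
--         return 0
--     cnt = 0
--     for row in lst[:n]:
--         prev = 0
--         for v in row[:n]:
--             if v != 0:
--                 if prev == 1 and v == 2:
--                     cnt += 1
--                 prev = v
--     return cnt
-- ===== Notes on version B (the rewrite author's own statement) =====
-- stated objective: simpler
-- what changed: B drops A's intermediate filtered matrix (new_lst) and its second index-based pair scan: one stateful left-to-right pass per row keeps only the last non-zero value seen (prev) and counts a pair whenever prev==1 meets a 2.
import Mathlib
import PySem

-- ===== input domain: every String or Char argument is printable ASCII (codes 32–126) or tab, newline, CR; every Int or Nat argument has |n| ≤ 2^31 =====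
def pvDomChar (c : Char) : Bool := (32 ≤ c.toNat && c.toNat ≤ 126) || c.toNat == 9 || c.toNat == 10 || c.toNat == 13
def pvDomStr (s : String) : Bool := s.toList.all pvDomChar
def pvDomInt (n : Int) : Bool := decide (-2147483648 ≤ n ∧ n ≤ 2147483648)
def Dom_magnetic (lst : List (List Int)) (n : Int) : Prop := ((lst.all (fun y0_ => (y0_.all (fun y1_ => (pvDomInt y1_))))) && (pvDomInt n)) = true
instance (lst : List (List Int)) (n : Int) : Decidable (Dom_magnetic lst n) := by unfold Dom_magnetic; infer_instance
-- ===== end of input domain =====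

-- B replaces A's intermediate filtered matrix and index-based pair scan by one stateful pass per row (simpler).

-- ===== PORT A =====
def magnetic (lst : List (List Int)) (n : Int) : Int :=
  let newLst := (PySem.List.pyRange 0 n 1).foldl (fun acc row =>
    let temp := (PySem.List.pyRange 0 n 1).foldl (fun temp column =>
      if PySem.List.pyGetD (PySem.List.pyGetD lst row []) column 0 ≠ 0 then
        temp ++ [PySem.List.pyGetD (PySem.List.pyGetD lst row []) column 0]
      else temp) ([] : List Int)
    acc ++ [temp]) ([] : List (List Int))
  (PySem.List.pyRange 0 n 1).foldl (fun cnt row =>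
    (PySem.List.pyRange 0 (((PySem.List.pyGetD newLst row []).length : Int) - 1) 1).foldl (fun cnt column =>
      if PySem.List.pyGetD (PySem.List.pyGetD newLst row []) column 0 = 1 ∧
         PySem.List.pyGetD (PySem.List.pyGetD newLst row []) (column + 1) 0 = 2 then cnt + 1
      else cnt) cnt) 0

-- ===== PORT B =====
def magnetic_alt (lst : List (List Int)) (n : Int) : Int :=
  if n ≤ 0 then 0
  else
    (PySem.List.slice lst (some 0) (some n)).foldl (fun cnt row =>
      ((PySem.List.slice row (some 0) (some n)).foldl
        (fun (st : Int × Int) v =>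
          if v ≠ 0 then ((if st.2 = 1 ∧ v = 2 then st.1 + 1 else st.1), v) else st)
        (cnt, (0 : Int))).1) 0

-- ===== PRECONDITION & SPEC =====
-- Pre_ excludes exactly the inputs where A raises IndexError: n rows must exist and each of the first n rows must have at least n columns.
def Pre_magnetic (lst : List (List Int)) (n : Int) : Prop :=
  n ≤ (lst.length : Int) ∧ ∀ row ∈ lst.take n.toNat, n ≤ (row.length : Int)
instance (lst : List (List Int)) (n : Int) : Decidable (Pre_magnetic lst n) := by unfold Pre_magnetic; infer_instance

def pvWitness_magnetic : List (List Int) × Int := ([[1, 0, 2], [0, 1, 2], [2, 1, 0]], 3)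

def Spec_magnetic (lst : List (List Int)) (n : Int) (out : Int) : Prop := out = magnetic_alt lst n
instance (lst : List (List Int)) (n : Int) (out : Int) : Decidable (Spec_magnetic lst n out) := by unfold Spec_magnetic; infer_instance

-- ===== CLAIM (what is proved, stated in full; the proofs are below) =====
def Claim_equal_magnetic : Prop := ∀ (lst : List (List Int)) (n : Int), Dom_magnetic lst n → Pre_magnetic lst n → Spec_magnetic lst n (magnetic lst n)

-- ===== LEMMAS AND PROOFS =====

/-- Number of adjacent (1,2) pairs in a list. -/
def pairsCnt : List Int → Int
  | a :: b :: t => (if a = 1 ∧ b = 2 then 1 else 0) + pairsCnt (b :: t)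
  | _ => 0

lemma pairsCnt_zero_cons (l : List Int) : pairsCnt (0 :: l) = pairsCnt l := by
  cases l <;> simp [pairsCnt]

/-- A's index-based pair scan over `List.range` counts pairsCnt. -/
lemma pairfold_nat (rest : List Int) : ∀ (x c : Int),
    (List.range rest.length).foldl
      (fun cnt k => if (x :: rest).getD k 0 = 1 ∧ (x :: rest).getD (k + 1) 0 = 2 then cnt + 1 else cnt) c
    = c + pairsCnt (x :: rest) := by
  induction rest with
  | nil => intro x c; simp [pairsCnt]
  | cons y t ih =>
    intro x c
    simp only [List.length_cons, List.range_succ_eq_map, List.foldl_cons, List.foldl_map,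
      List.getD_cons_zero, List.getD_cons_succ, Nat.succ_eq_add_one]
    have ih' : ∀ c' : Int,
        (List.range t.length).foldl
          (fun cnt k => if (y :: t).getD k 0 = 1 ∧ t.getD k 0 = 2 then cnt + 1 else cnt) c'
        = c' + pairsCnt (y :: t) := by
      intro c'
      simpa only [List.getD_cons_succ] using ih y c'
    rw [ih']
    simp only [pairsCnt]
    split_ifs <;> ring

/-- A's pyRange/pyGetD pair scan equals pairsCnt. -/
lemma pairfold (r : List Int) (c : Int) :
    (PySem.List.pyRange 0 ((r.length : Int) - 1) 1).foldl
      (fun cnt column => if PySem.List.pyGetD r column 0 = 1 ∧ PySem.List.pyGetD r (column + 1) 0 = 2 then cnt + 1 else cnt) c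
    = c + pairsCnt r := by
  cases r with
  | nil => simp [PySem.List.pyRange_one_eq_nil (by norm_num : (-1:Int) ≤ 0), pairsCnt]
  | cons x rest =>
    have hlen : (((x :: rest).length : Int) - 1) = ((rest.length : Nat) : Int) := by
      simp
    rw [hlen, PySem.List.pyRange_zero_natCast, List.foldl_map]
    have hf : (fun (cnt : Int) (k : Nat) =>
        if PySem.List.pyGetD (x :: rest) (k : Int) 0 = 1 ∧ PySem.List.pyGetD (x :: rest) ((k : Int) + 1) 0 = 2
        then cnt + 1 else cnt)
        = (fun (cnt : Int) (k : Nat) =>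
        if (x :: rest).getD k 0 = 1 ∧ (x :: rest).getD (k + 1) 0 = 2 then cnt + 1 else cnt) := by
      funext cnt k
      rw [show ((k : Int) + 1) = ((k + 1 : Nat) : Int) from by push_cast; ring,
        PySem.List.pyGetD_natCast, PySem.List.pyGetD_natCast]
    rw [hf]
    exact pairfold_nat rest x c

/-- B's stateful row scan counts pairsCnt of prev-prefixed filtered row. -/
lemma scanfold (row : List Int) : ∀ (c p : Int),
    (row.foldl (fun (st : Int × Int) v =>
        if v ≠ 0 then ((if st.2 = 1 ∧ v = 2 then st.1 + 1 else st.1), v) else st) (c, p)).1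
    = c + pairsCnt (p :: row.filter (fun v => decide (v ≠ 0))) := by
  induction row with
  | nil => intro c p; simp [pairsCnt]
  | cons v t ih =>
    intro c p
    by_cases hv : v = 0
    · subst hv; simpa using ih c p
    · simp only [List.foldl_cons, if_pos (show v ≠ 0 from hv)]
      rw [ih]
      have hfil : (v :: t).filter (fun v => decide (v ≠ 0)) = v :: t.filter (fun v => decide (v ≠ 0)) := by
        simp [hv]
      rw [hfil]
      simp only [pairsCnt]
      split_ifs <;> ring

/-- Fold over pyRange 0 n of pyGetD equals fold over the n-prefix (requires 0 ≤ n ≤ len). -/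
lemma fold_range_getD {α β : Type} (xs : List α) (d : α) (f : β → α → β) (init : β)
    (n : Int) (h0 : 0 ≤ n) (hn : n ≤ (xs.length : Int)) :
    (PySem.List.pyRange 0 n 1).foldl (fun acc j => f acc (PySem.List.pyGetD xs j d)) init
    = (xs.take n.toNat).foldl f init := by
  have hcongr : (PySem.List.pyRange 0 n 1).foldl (fun acc j => f acc (PySem.List.pyGetD xs j d)) init
      = (PySem.List.pyRange 0 n 1).foldl (fun acc j => f acc (PySem.List.pyGetD (xs.take n.toNat) j d)) init := by
    apply PySem.List.foldl_congr_mem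
    intro acc j hj
    rw [PySem.List.mem_pyRange_one] at hj
    rw [show j = ((j.toNat : Nat) : Int) from by omega,
      PySem.List.pyGetD_natCast, PySem.List.pyGetD_natCast]
    have hlt : j.toNat < n.toNat := by omega
    unfold List.getD
    rw [List.getElem?_take_of_lt hlt]
  rw [hcongr]
  have hx : ((xs.take n.toNat).length : Int) = n := by simp; omega
  rw [show PySem.List.pyRange 0 n 1 = PySem.List.pyRange 0 ((xs.take n.toNat).length : Int) 1 from by rw [hx]]
  exact PySem.List.foldl_pyRange_zero_pyGetD' (xs.take n.toNat) d f init

/-- A's append-if inner loop is a filter. -/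
lemma filterfold (l : List Int) : ∀ (acc : List Int),
    l.foldl (fun t v => if v ≠ 0 then t ++ [v] else t) acc
    = acc ++ l.filter (fun v => decide (v ≠ 0)) := by
  induction l with
  | nil => intro acc; simp
  | cons v t ih =>
    intro acc
    by_cases hv : v = 0
    · subst hv; simpa using ih acc
    · simp only [List.foldl_cons, if_pos (show v ≠ 0 from hv)]
      rw [ih]
      simp [hv]

theorem magnetic_spec : Claim_equal_magnetic := by
  intro lst n _ hpre
  obtain ⟨h1, h2⟩ := hpre
  unfold Spec_magnetic
  by_cases hn : n ≤ 0
  · simp [magnetic, magnetic_alt, PySem.List.pyRange_one_eq_nil hn, if_pos hn]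
  · rw [not_le] at hn
    have h0n : (0 : Int) ≤ n := le_of_lt hn
    -- RHS: B as a fold over the taken rows, counting pairsCnt of the filtered taken row
    have hRHS : magnetic_alt lst n
        = (lst.take n.toNat).foldl
            (fun c row => c + pairsCnt ((row.take n.toNat).filter (fun v => decide (v ≠ 0)))) 0 := by
      simp only [magnetic_alt, if_neg (show ¬ n ≤ 0 from not_le.mpr hn)]
      rw [PySem.List.slice_toNat lst le_rfl h0n]
      simp only [Int.toNat_zero, List.drop_zero, Nat.sub_zero]
      apply PySem.List.foldl_congr_mem
      intro acc row _
      rw [PySem.List.slice_toNat row le_rfl h0n]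
      simp only [Int.toNat_zero, List.drop_zero, Nat.sub_zero]
      rw [scanfold, pairsCnt_zero_cons]
    -- LHS: A
    have hLHS : magnetic lst n
        = (lst.take n.toNat).foldl
            (fun c row => c + pairsCnt ((row.take n.toNat).filter (fun v => decide (v ≠ 0)))) 0 := by
      simp only [magnetic]
      rw [PySem.List.foldl_append_singleton_eq_map
        (fun row => (PySem.List.pyRange 0 n 1).foldl (fun temp column =>
          if PySem.List.pyGetD (PySem.List.pyGetD lst row []) column 0 ≠ 0 then
            temp ++ [PySem.List.pyGetD (PySem.List.pyGetD lst row []) column 0]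
          else temp) ([] : List Int)) (PySem.List.pyRange 0 n 1) []]
      simp only [List.nil_append]
      have hlen : (((PySem.List.pyRange 0 n 1).map (fun row =>
          (PySem.List.pyRange 0 n 1).foldl (fun temp column =>
            if PySem.List.pyGetD (PySem.List.pyGetD lst row []) column 0 ≠ 0 then
              temp ++ [PySem.List.pyGetD (PySem.List.pyGetD lst row []) column 0]
            else temp) ([] : List Int))).length : Int) = n := by
        simp [PySem.List.length_pyRange_one]; omega
      -- the counting loop over pyRange with pyGetD newLst = loop over newLst itself
      refine Eq.trans (fold_range_getD
        ((PySem.List.pyRange 0 n 1).map (fun row =>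
          (PySem.List.pyRange 0 n 1).foldl (fun temp column =>
            if PySem.List.pyGetD (PySem.List.pyGetD lst row []) column 0 ≠ 0 then
              temp ++ [PySem.List.pyGetD (PySem.List.pyGetD lst row []) column 0]
            else temp) ([] : List Int))) []
        (fun (cnt : Int) (r : List Int) =>
          (PySem.List.pyRange 0 ((r.length : Int) - 1) 1).foldl (fun cnt column =>
            if PySem.List.pyGetD r column 0 = 1 ∧ PySem.List.pyGetD r (column + 1) 0 = 2 then cnt + 1
            else cnt) cnt) 0 n h0n (le_of_eq hlen.symm)) ?_
      rw [List.take_of_length_le (by omega)]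
      rw [show (fun (cnt : Int) (r : List Int) =>
          (PySem.List.pyRange 0 ((r.length : Int) - 1) 1).foldl (fun cnt column =>
            if PySem.List.pyGetD r column 0 = 1 ∧ PySem.List.pyGetD r (column + 1) 0 = 2 then cnt + 1
            else cnt) cnt)
          = (fun (cnt : Int) (r : List Int) => cnt + pairsCnt r) from by
          funext cnt r; exact pairfold r cnt]
      rw [List.foldl_map]
      -- pointwise on rows of the range: the built row = filtered taken actual row
      refine Eq.trans (PySem.List.foldl_congr_mem _ _
        (fun c row => c + pairsCnt
          (((PySem.List.pyGetD lst row []).take n.toNat).filter (fun v => decide (v ≠ 0)))) 0 ?_) ?_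
      · intro acc row hrow
        rw [PySem.List.mem_pyRange_one] at hrow
        have hmem : PySem.List.pyGetD lst row [] ∈ lst.take n.toNat := by
          rw [show row = ((row.toNat : Nat) : Int) from by omega, PySem.List.pyGetD_natCast]
          have hlt2 : row.toNat < lst.length := by omega
          have hlt3 : row.toNat < (lst.take n.toNat).length := by simp; omega
          have : lst.getD row.toNat [] = (lst.take n.toNat)[row.toNat] := by
            rw [List.getD_eq_getElem lst [] hlt2, List.getElem_take]
          rw [this]
          exact List.getElem_mem hlt3
        have hrl : n ≤ ((PySem.List.pyGetD lst row []).length : Int) := h2 _ hmem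
        have hG : (PySem.List.pyRange 0 n 1).foldl (fun temp column =>
            if PySem.List.pyGetD (PySem.List.pyGetD lst row []) column 0 ≠ 0 then
              temp ++ [PySem.List.pyGetD (PySem.List.pyGetD lst row []) column 0]
            else temp) ([] : List Int)
            = ((PySem.List.pyGetD lst row []).take n.toNat).filter (fun v => decide (v ≠ 0)) := by
          refine Eq.trans (fold_range_getD (PySem.List.pyGetD lst row []) 0
            (fun (temp : List Int) (v : Int) => if v ≠ 0 then temp ++ [v] else temp)
            [] n h0n hrl) ?_
          rw [filterfold]
          simp
        simp only []
        rw [hG]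
      -- finally the outer pyRange loop over pyGetD lst = loop over lst.take n
      exact fold_range_getD lst []
        (fun c row => c + pairsCnt ((row.take n.toNat).filter (fun v => decide (v ≠ 0)))) 0 n h0n h1
    rw [hLHS, hRHS]
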